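-- pv_equiv track=rewrite | github.com/JongKyuHong/TIL | Algorithm/2021.12.3w/algo/뉴스클러스터링.py | solution
-- ===== SOURCE A (Python) =====
-- from collections import Counter
--
-- def solution(str1, str2):
--     list1, list2 = [], []
--     for i in range(len(str1)-1):
--         list1.append(str1[i].lower()+str1[i+1].lower())
--     for i in range(len(str2)-1):
--         list2.append(str2[i].lower()+str2[i+1].lower())
--
--     list1 = Counter(list1)
--     list2 = Counter(list2)
--     a, b = [], []
--     for i in list1:
--         if i.isalpha():
--             a_val = min(list1[i],list2[i])
--             b_val = max(list1[i],list2[i])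
--             for _ in range(a_val):
--                 a.append(i)
--             for _ in range(b_val):
--                 b.append(i)
--     for i in list2:
--         if i.isalpha() and i not in b:
--             b_val = max(list1[i],list2[i])
--             for _ in range(b_val):
--                 b.append(i)
--
--     if not b and not a:
--         return 65536
--     else:
--         return int((len(a)/len(b))*65536)
-- ===== SOURCE B (Python) =====
-- def solution(str1, str2):
--     def grams(s):
--         s = s.lower()
--         d = {}
--         for x, y in zip(s, s[1:]):
--             if x.isalpha() and y.isalpha():
--                 g = x + y
--                 d[g] = d.get(g, 0) + 1
--         return d
--     c1 = grams(str1)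
--     c2 = grams(str2)
--     inter = sum(min(v, c2.get(k, 0)) for k, v in c1.items())
--     union = sum(c1.values()) + sum(c2.values()) - inter
--     if union == 0:
--         return 65536
--     return inter * 65536 // union
-- ===== Notes on version B (the rewrite author's own statement) =====
-- stated objective: faster
-- what changed: Replaces A's materialised multiset lists a/b (built key by key with an 'i not in b' membership scan over the growing list b) by counting dicts of the alphabetic 2-grams built in one pass, summing min over one dict's items for the intersection and using |union| = total1 + total2 - |intersection| arithmetically.
import Mathlib
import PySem

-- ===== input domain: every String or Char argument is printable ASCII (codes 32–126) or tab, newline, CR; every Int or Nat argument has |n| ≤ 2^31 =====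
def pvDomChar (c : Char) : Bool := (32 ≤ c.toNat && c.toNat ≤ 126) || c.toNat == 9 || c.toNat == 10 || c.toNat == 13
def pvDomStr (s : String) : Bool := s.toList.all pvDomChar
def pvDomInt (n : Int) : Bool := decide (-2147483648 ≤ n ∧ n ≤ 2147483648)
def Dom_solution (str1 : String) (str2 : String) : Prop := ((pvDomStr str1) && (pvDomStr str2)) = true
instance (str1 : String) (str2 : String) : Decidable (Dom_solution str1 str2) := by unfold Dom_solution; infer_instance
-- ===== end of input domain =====

-- B replaces A's element-by-element multiset lists (with a linear 'i not in b' scan per key) by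
-- counting dicts of the alphabetic 2-grams and the identity |union| = total1 + total2 - |intersection|.
-- A mutates nothing; equivalence is about the return value.
-- Python 2-char strings (the 2-grams) are modelled as List Char, per the PySem convention.

-- ===== PORT A =====
-- for i in range(len(s)-1): list.append(s[i].lower()+s[i+1].lower())   (indices are in range by construction)
def solAList (s : List Char) : List (List Char) :=
  (PySem.List.pyRange 0 (PySem.List.len s - 1) 1).foldl
    (fun acc i => acc ++ [[PySem.Chars.lowerChar (PySem.List.pyGetD s i ' '),
                           PySem.Chars.lowerChar (PySem.List.pyGetD s (i + 1) ' ')]]) []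

-- int((len(a)/len(b))*65536) with 0 ≤ len(a) ≤ len(b): the float result truncates to
-- floor(len(a)*65536/len(b)) exactly for every len(b) < 2^37 (the double's relative error 2^-53
-- cannot bridge the ≥ 1/(65536*len(b)) gap to the next multiple of 1/65536), so it is ported as
-- floor division — exact on the whole domain of realizable strings.
def solution (str1 : String) (str2 : String) : Int :=
  let list1 := solAList str1.toList
  let list2 := solAList str2.toList
  let c1 := PySem.Dict.counter list1
  let c2 := PySem.Dict.counter list2
  let ab := c1.keys.foldl (fun ab k =>
      if PySem.Chars.strIsalpha k then
        let aval := min (c1.getD k 0) (c2.getD k 0)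
        let bval := max (c1.getD k 0) (c2.getD k 0)
        ((PySem.List.pyRange 0 aval 1).foldl (fun a _ => a ++ [k]) ab.1,
         (PySem.List.pyRange 0 bval 1).foldl (fun b _ => b ++ [k]) ab.2)
      else ab) ([], [])
  let a := ab.1
  let b := c2.keys.foldl (fun b k =>
      if PySem.Chars.strIsalpha k && !(b.contains k) then
        (PySem.List.pyRange 0 (max (c1.getD k 0) (c2.getD k 0)) 1).foldl (fun b _ => b ++ [k]) b
      else b) ab.2
  if b = [] ∧ a = [] then 65536
  else PySem.Int.floordiv ((a.length : Int) * 65536) ((b.length : Int))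

-- ===== PORT B =====
-- one pass over zip(s, s[1:]) of the lowered string, counting only alphabetic 2-grams
def solAltGrams (s : String) : PySem.Dict (List Char) Int :=
  let t := PySem.Chars.lower s.toList
  (t.zip t.tail).foldl
    (fun d p => if PySem.Chars.isalpha p.1 && PySem.Chars.isalpha p.2 then
        d.insert [p.1, p.2] (d.getD [p.1, p.2] 0 + 1) else d)
    PySem.Dict.empty

def solution_alt (str1 : String) (str2 : String) : Int :=
  let c1 := solAltGrams str1
  let c2 := solAltGrams str2
  let inter := c1.items.foldl (fun acc p => acc + min p.2 (c2.getD p.1 0)) 0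
  let union := c1.values.sum + c2.values.sum - inter
  if union = 0 then 65536
  else PySem.Int.floordiv (inter * 65536) union

-- ===== PRECONDITION & SPEC =====
def Spec_solution (str1 : String) (str2 : String) (out : Int) : Prop := out = solution_alt str1 str2
instance (str1 : String) (str2 : String) (out : Int) : Decidable (Spec_solution str1 str2 out) := by unfold Spec_solution; infer_instance

-- ===== CLAIM (what is proved, stated in full; the proofs are below) =====
def Claim_equal_solution : Prop := ∀ (str1 : String) (str2 : String), Dom_solution str1 str2 → Spec_solution str1 str2 (solution str1 str2)

-- ===== LEMMAS AND PROOFS =====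

def bgL (s : List Char) : List (List Char) :=
  (s.zip s.tail).map (fun p => [PySem.Chars.lowerChar p.1, PySem.Chars.lowerChar p.2])

def fgL (s : List Char) : List (List Char) := (bgL s).filter PySem.Chars.strIsalpha

lemma solAList_eq (s : List Char) : solAList s = bgL s := by
  unfold solAList bgL
  rw [PySem.List.foldl_append_singleton_eq_map, PySem.List.pyRange_one]
  rw [List.map_map]
  apply List.ext_getElem
  · simp [List.length_zip]
  · intro i h1 h2
    have hi : i + 1 < s.length := by
      simp [List.length_zip] at h2; omega
    simp only [List.nil_append, List.getElem_map, List.getElem_range, Function.comp_apply,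
      List.getElem_zip, List.getElem_tail]
    have e1 : (PySem.List.pyGetD s (0 + (i:Int)) ' ') = s[i] := by
      rw [show ((0:Int) + (i:Int)) = ((i:Int)) by ring, PySem.List.pyGetD_eq_getElem]
      · simp
      · simp
      · simp; omega
    have e2 : (PySem.List.pyGetD s (0 + (i:Int) + 1) ' ') = s[i+1] := by
      rw [show ((0:Int) + (i:Int) + 1) = (((i+1 : Nat):Int)) by push_cast; ring,
        PySem.List.pyGetD_eq_getElem] <;> simp <;> omega
    rw [e1, e2]

lemma strIsalpha_pair (x y : Char) :
    PySem.Chars.strIsalpha [x, y] = (PySem.Chars.isalpha x && PySem.Chars.isalpha y) := by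
  simp [PySem.Chars.strIsalpha]

lemma grams_filter_eq (s : List Char) :
    (((PySem.Chars.lower s).zip (PySem.Chars.lower s).tail).filter
        (fun p => PySem.Chars.isalpha p.1 && PySem.Chars.isalpha p.2)).map
      (fun p : Char × Char => [p.1, p.2]) = fgL s := by
  unfold fgL bgL
  show (((s.map PySem.Chars.lowerChar).zip (s.map PySem.Chars.lowerChar).tail).filter _).map _ = _
  rw [← List.map_tail, List.zip_map, List.filter_map, List.map_map, List.filter_map]
  congr 1
  apply List.filter_congr
  intro p _
  simp [strIsalpha_pair, Prod.map]

lemma altGrams_eq (s : String) : solAltGrams s = PySem.Dict.counter (fgL s.toList) := by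
  show (((PySem.Chars.lower s.toList).zip (PySem.Chars.lower s.toList).tail).foldl _ _) = _
  rw [PySem.List.foldl_if_eq_foldl_filter
        (fun p : Char × Char => PySem.Chars.isalpha p.1 && PySem.Chars.isalpha p.2)
        (fun (d : PySem.Dict (List Char) Int) (p : Char × Char) =>
          d.insert [p.1, p.2] (d.getD [p.1, p.2] 0 + 1))
        ((PySem.Chars.lower s.toList).zip (PySem.Chars.lower s.toList).tail) PySem.Dict.empty]
  rw [← grams_filter_eq s.toList, ← PySem.Dict.foldl_insert_getD_add_one_eq_counter, List.foldl_map]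

lemma sum_count_int (L : List (List Char)) (K : List (List Char)) (hn : K.Nodup)
    (hc : ∀ k ∈ L, k ∈ K) :
    (K.map (fun k => (L.count k : Int))).sum = L.length := by
  induction L with
  | nil => simp
  | cons x L ih =>
    have hx : x ∈ K := hc x (by simp)
    have hrest : ∀ k ∈ L, k ∈ K := fun k hk => hc k (by simp [hk])
    have hfun : (fun k => ((x :: L).count k : Int))
        = fun k => (L.count k : Int) + (if k == x then (1 : Int) else 0) := by
      funext k
      rw [List.count_cons]
      by_cases h : x = k
      · simp [h]
      · simp [h, Ne.symm h]
    have hsplit : (K.map (fun k => ((x :: L).count k : Int))).sum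
        = (K.map (fun k => (L.count k : Int))).sum
          + (K.map (fun k => if k == x then (1 : Int) else 0)).sum := by
      rw [hfun, ← List.sum_map_add]
    rw [hsplit, ih hrest, PySem.List.sum_map_ite_one_zero]
    have : K.countP (fun k => k == x) = K.count x := rfl
    rw [this, List.count_eq_one_of_mem hn hx]
    simp


lemma foldl_rep (v : Int) (k : List Char) (a : List (List Char)) :
    (PySem.List.pyRange 0 v 1).foldl (fun a _ => a ++ [k]) a = a ++ List.replicate v.toNat k := by
  rw [PySem.List.foldl_append_singleton_eq_map (fun _ => k)]
  congr 1
  rw [List.map_const', PySem.List.length_pyRange_one]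
  simp

lemma loop1_eq (p : List Char → Bool) (m M : List Char → Int)
    (l : List (List Char)) :
    l.foldl (fun ab k => if p k then
        ((PySem.List.pyRange 0 (m k) 1).foldl (fun a _ => a ++ [k]) ab.1,
         (PySem.List.pyRange 0 (M k) 1).foldl (fun b _ => b ++ [k]) ab.2)
      else ab) (([], []) : List (List Char) × List (List Char))
    = ((l.filter p).flatMap (fun k => List.replicate (m k).toNat k),
       (l.filter p).flatMap (fun k => List.replicate (M k).toNat k)) := by
  have hstep : (fun (ab : List (List Char) × List (List Char)) k => if p k then
        ((PySem.List.pyRange 0 (m k) 1).foldl (fun a _ => a ++ [k]) ab.1,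
         (PySem.List.pyRange 0 (M k) 1).foldl (fun b _ => b ++ [k]) ab.2)
      else ab)
      = fun ab k => (if p k then ab.1 ++ List.replicate (m k).toNat k else ab.1,
                     if p k then ab.2 ++ List.replicate (M k).toNat k else ab.2) := by
    funext ab k
    by_cases h : p k <;> simp [h]
  rw [hstep, PySem.List.foldl_prod_mk
        (f := fun a k => if p k = true then a ++ List.replicate (m k).toNat k else a)
        (g := fun b k => if p k = true then b ++ List.replicate (M k).toNat k else b)]
  rw [PySem.List.foldl_if_eq_foldl_filter p (fun a k => a ++ List.replicate (m k).toNat k),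
      PySem.List.foldl_if_eq_foldl_filter p (fun b k => b ++ List.replicate (M k).toNat k),
      PySem.List.foldl_append_eq_flatMap, PySem.List.foldl_append_eq_flatMap]
  simp

lemma loop2_eq (p : List Char → Bool) (n : List Char → Int)
    (l : List (List Char)) (hl : l.Nodup) :
    ∀ (b : List (List Char)),
    l.foldl (fun b k => if p k && !(b.contains k) then
        (PySem.List.pyRange 0 (n k) 1).foldl (fun b _ => b ++ [k]) b else b) b
    = b ++ (l.filter (fun k => p k && !(b.contains k))).flatMap
        (fun k => List.replicate (n k).toNat k) := by
  induction l with
  | nil => simp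
  | cons k l ih =>
    intro b
    have hknl : k ∉ l := (List.nodup_cons.mp hl).1
    have hnl : l.Nodup := (List.nodup_cons.mp hl).2
    simp only [List.foldl_cons, List.filter_cons]
    by_cases h : (p k && !(b.contains k)) = true
    · simp only [h, if_true, List.flatMap_cons]
      rw [foldl_rep, ih hnl]
      have hfc : l.filter (fun k' => p k' && !((b ++ List.replicate (n k).toNat k).contains k'))
          = l.filter (fun k' => p k' && !(b.contains k')) := by
        apply List.filter_congr
        intro k' hk'
        have hne : k' ≠ k := fun e => hknl (e ▸ hk')
        simp [hne]
      rw [hfc, List.append_assoc]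
    · simp only [h]
      rw [ih hnl]
      simp

lemma core (G1 G2 : List (List Char)) :
    (if ((List.flatMap (fun k => List.replicate (max (List.count k G1) (List.count k G2)) k) (List.filter PySem.Chars.strIsalpha (PySem.Set.ofList G1))) ++ List.flatMap (fun k => List.replicate (max (List.count k G1) (List.count k G2)) k) (List.filter (fun k => PySem.Chars.strIsalpha k && !((List.flatMap (fun k => List.replicate (max (List.count k G1) (List.count k G2)) k) (List.filter PySem.Chars.strIsalpha (PySem.Set.ofList G1))).contains k)) (PySem.Set.ofList G2))) = [] ∧ (List.flatMap (fun k => List.replicate (min (List.count k G1) (List.count k G2)) k) (List.filter PySem.Chars.strIsalpha (PySem.Set.ofList G1))) = [] then (65536 : ℤ)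
     else PySem.Int.floordiv (((List.flatMap (fun k => List.replicate (min (List.count k G1) (List.count k G2)) k) (List.filter PySem.Chars.strIsalpha (PySem.Set.ofList G1))).length : ℤ) * 65536) (((List.flatMap (fun k => List.replicate (max (List.count k G1) (List.count k G2)) k) (List.filter PySem.Chars.strIsalpha (PySem.Set.ofList G1))) ++ List.flatMap (fun k => List.replicate (max (List.count k G1) (List.count k G2)) k) (List.filter (fun k => PySem.Chars.strIsalpha k && !((List.flatMap (fun k => List.replicate (max (List.count k G1) (List.count k G2)) k) (List.filter PySem.Chars.strIsalpha (PySem.Set.ofList G1))).contains k)) (PySem.Set.ofList G2))).length : ℤ))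
    = if (((List.map (fun k => ((List.count k (List.filter PySem.Chars.strIsalpha G1) : ℕ) : ℤ)) (PySem.Set.ofList (List.filter PySem.Chars.strIsalpha G1))).sum) + ((List.map (fun k => ((List.count k (List.filter PySem.Chars.strIsalpha G2) : ℕ) : ℤ)) (PySem.Set.ofList (List.filter PySem.Chars.strIsalpha G2))).sum) - ((List.map (fun k => ((min (List.count k (List.filter PySem.Chars.strIsalpha G1)) (List.count k (List.filter PySem.Chars.strIsalpha G2)) : ℕ) : ℤ)) (PySem.Set.ofList (List.filter PySem.Chars.strIsalpha G1))).sum)) = 0 then 65536 else PySem.Int.floordiv (((List.map (fun k => ((min (List.count k (List.filter PySem.Chars.strIsalpha G1)) (List.count k (List.filter PySem.Chars.strIsalpha G2)) : ℕ) : ℤ)) (PySem.Set.ofList (List.filter PySem.Chars.strIsalpha G1))).sum) * 65536) (((List.map (fun k => ((List.count k (List.filter PySem.Chars.strIsalpha G1) : ℕ) : ℤ)) (PySem.Set.ofList (List.filter PySem.Chars.strIsalpha G1))).sum) + ((List.map (fun k => ((List.count k (List.filter PySem.Chars.strIsalpha G2) : ℕ) : ℤ)) (PySem.Set.ofList (List.filter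 PySem.Chars.strIsalpha G2))).sum) - ((List.map (fun k => ((min (List.count k (List.filter PySem.Chars.strIsalpha G1)) (List.count k (List.filter PySem.Chars.strIsalpha G2)) : ℕ) : ℤ)) (PySem.Set.ofList (List.filter PySem.Chars.strIsalpha G1))).sum)) := by
  have ndK1 : (List.filter PySem.Chars.strIsalpha (PySem.Set.ofList G1)).Nodup := (PySem.Set.nodup_ofList G1).filter _
  have ndSF1 : (PySem.Set.ofList (List.filter PySem.Chars.strIsalpha G1)).Nodup := PySem.Set.nodup_ofList _
  have ndSF2 : (PySem.Set.ofList (List.filter PySem.Chars.strIsalpha G2)).Nodup := PySem.Set.nodup_ofList _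
  have ndK2 : (List.filter (fun k => PySem.Chars.strIsalpha k && !((List.flatMap (fun k => List.replicate (max (List.count k G1) (List.count k G2)) k) (List.filter PySem.Chars.strIsalpha (PySem.Set.ofList G1))).contains k)) (PySem.Set.ofList G2)).Nodup := (PySem.Set.nodup_ofList G2).filter _
  have memK1 : ∀ k, k ∈ (List.filter PySem.Chars.strIsalpha (PySem.Set.ofList G1)) ↔ k ∈ G1 ∧ PySem.Chars.strIsalpha k = true := by
    intro k; simp [List.mem_filter, PySem.Set.mem_ofList]
  have memB1 : ∀ k, k ∈ (List.flatMap (fun k => List.replicate (max (List.count k G1) (List.count k G2)) k) (List.filter PySem.Chars.strIsalpha (PySem.Set.ofList G1))) ↔ k ∈ (List.filter PySem.Chars.strIsalpha (PySem.Set.ofList G1)) := by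
    intro k
    simp only [List.mem_flatMap, List.mem_replicate]
    constructor
    · rintro ⟨a, ha, -, rfl⟩; exact ha
    · intro hk
      refine ⟨k, hk, ?_, rfl⟩
      have hg : k ∈ G1 := ((memK1 k).mp hk).1
      have : 0 < List.count k G1 := List.count_pos_iff.mpr hg
      omega
  have memK2 : ∀ k, k ∈ (List.filter (fun k => PySem.Chars.strIsalpha k && !((List.flatMap (fun k => List.replicate (max (List.count k G1) (List.count k G2)) k) (List.filter PySem.Chars.strIsalpha (PySem.Set.ofList G1))).contains k)) (PySem.Set.ofList G2)) ↔ k ∈ G2 ∧ PySem.Chars.strIsalpha k = true ∧ k ∉ G1 := by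
    intro k
    simp only [List.mem_filter, PySem.Set.mem_ofList, Bool.and_eq_true, Bool.not_eq_true',
      List.contains_eq_mem, decide_eq_false_iff_not, memB1, memK1]
    tauto
  -- alpha members have equal counts in G and its filtered form
  have cntF1 : ∀ k, PySem.Chars.strIsalpha k = true → List.count k (List.filter PySem.Chars.strIsalpha G1) = List.count k G1 :=
    fun k h => List.count_filter h
  have cntF2 : ∀ k, PySem.Chars.strIsalpha k = true → List.count k (List.filter PySem.Chars.strIsalpha G2) = List.count k G2 :=
    fun k h => List.count_filter h
  -- the two key sets agree up to permutation
  have permK1 : (List.filter PySem.Chars.strIsalpha (PySem.Set.ofList G1)).Perm (PySem.Set.ofList (List.filter PySem.Chars.strIsalpha G1)) := by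
    rw [List.perm_ext_iff_of_nodup ndK1 ndSF1]
    intro k
    rw [memK1 k, PySem.Set.mem_ofList, List.mem_filter]
  -- Nat lengths of the three built lists
  have lA : (List.flatMap (fun k => List.replicate (min (List.count k G1) (List.count k G2)) k) (List.filter PySem.Chars.strIsalpha (PySem.Set.ofList G1))).length = ((List.filter PySem.Chars.strIsalpha (PySem.Set.ofList G1)).map (fun k => min (List.count k G1) (List.count k G2))).sum := by
    simp [List.length_flatMap]
  have lB1 : (List.flatMap (fun k => List.replicate (max (List.count k G1) (List.count k G2)) k) (List.filter PySem.Chars.strIsalpha (PySem.Set.ofList G1))).length = ((List.filter PySem.Chars.strIsalpha (PySem.Set.ofList G1)).map (fun k => max (List.count k G1) (List.count k G2))).sum := by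
    simp [List.length_flatMap]
  have lB2 : (List.flatMap (fun k => List.replicate (max (List.count k G1) (List.count k G2)) k) (List.filter (fun k => PySem.Chars.strIsalpha k && !((List.flatMap (fun k => List.replicate (max (List.count k G1) (List.count k G2)) k) (List.filter PySem.Chars.strIsalpha (PySem.Set.ofList G1))).contains k)) (PySem.Set.ofList G2))).length
      = ((List.filter (fun k => PySem.Chars.strIsalpha k && !((List.flatMap (fun k => List.replicate (max (List.count k G1) (List.count k G2)) k) (List.filter PySem.Chars.strIsalpha (PySem.Set.ofList G1))).contains k)) (PySem.Set.ofList G2)).map (fun k => max (List.count k G1) (List.count k G2))).sum := by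
    simp [List.length_flatMap]
  -- I over K1 instead of Set.ofList F1
  have i1 : ((List.map (fun k => ((min (List.count k (List.filter PySem.Chars.strIsalpha G1)) (List.count k (List.filter PySem.Chars.strIsalpha G2)) : ℕ) : ℤ)) (PySem.Set.ofList (List.filter PySem.Chars.strIsalpha G1))).sum) = ((List.filter PySem.Chars.strIsalpha (PySem.Set.ofList G1)).map (fun k => ((min (List.count k G1) (List.count k G2) : ℕ) : ℤ))).sum := by
    rw [← (permK1.map _).sum_eq]
    apply congrArg
    apply List.map_congr_left
    intro k hk
    have ha : PySem.Chars.strIsalpha k = true := ((memK1 k).mp hk).2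
    rw [cntF1 k ha, cntF2 k ha]
  -- sum over K1 of counts in G1 is the length of F1
  have e1 : ((List.filter PySem.Chars.strIsalpha (PySem.Set.ofList G1)).map (fun k => ((List.count k G1 : ℕ) : ℤ))).sum = ((List.filter PySem.Chars.strIsalpha G1).length : ℤ) := by
    rw [show ((List.filter PySem.Chars.strIsalpha (PySem.Set.ofList G1)).map (fun k => ((List.count k G1 : ℕ) : ℤ)))
        = ((List.filter PySem.Chars.strIsalpha (PySem.Set.ofList G1)).map (fun k => ((List.count k (List.filter PySem.Chars.strIsalpha G1) : ℕ) : ℤ))) from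
      List.map_congr_left (fun k hk => by rw [cntF1 k ((memK1 k).mp hk).2])]
    exact sum_count_int (List.filter PySem.Chars.strIsalpha G1) (List.filter PySem.Chars.strIsalpha (PySem.Set.ofList G1)) ndK1 (fun k hk => (memK1 k).mpr
      ⟨(List.mem_filter.mp hk).1, (List.mem_filter.mp hk).2⟩)
  have t1 : ((List.map (fun k => ((List.count k (List.filter PySem.Chars.strIsalpha G1) : ℕ) : ℤ)) (PySem.Set.ofList (List.filter PySem.Chars.strIsalpha G1))).sum) = ((List.filter PySem.Chars.strIsalpha G1).length : ℤ) :=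
    sum_count_int (List.filter PySem.Chars.strIsalpha G1) (PySem.Set.ofList (List.filter PySem.Chars.strIsalpha G1)) ndSF1 (fun k hk => by simp [PySem.Set.mem_ofList, hk])
  have t2 : ((List.map (fun k => ((List.count k (List.filter PySem.Chars.strIsalpha G2) : ℕ) : ℤ)) (PySem.Set.ofList (List.filter PySem.Chars.strIsalpha G2))).sum) = ((List.filter PySem.Chars.strIsalpha G2).length : ℤ) :=
    sum_count_int (List.filter PySem.Chars.strIsalpha G2) (PySem.Set.ofList (List.filter PySem.Chars.strIsalpha G2)) ndSF2 (fun k hk => by simp [PySem.Set.mem_ofList, hk])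
  -- counts in G2 over K1 and K2 together cover F2
  have e2 : ((List.filter PySem.Chars.strIsalpha (PySem.Set.ofList G1)).map (fun k => ((List.count k G2 : ℕ) : ℤ))).sum
      + ((List.filter (fun k => PySem.Chars.strIsalpha k && !((List.flatMap (fun k => List.replicate (max (List.count k G1) (List.count k G2)) k) (List.filter PySem.Chars.strIsalpha (PySem.Set.ofList G1))).contains k)) (PySem.Set.ofList G2)).map (fun k => ((List.count k G2 : ℕ) : ℤ))).sum = ((List.filter PySem.Chars.strIsalpha G2).length : ℤ) := by
    rw [show ((List.filter PySem.Chars.strIsalpha (PySem.Set.ofList G1)).map (fun k => ((List.count k G2 : ℕ) : ℤ)))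
        = ((List.filter PySem.Chars.strIsalpha (PySem.Set.ofList G1)).map (fun k => ((List.count k (List.filter PySem.Chars.strIsalpha G2) : ℕ) : ℤ))) from
      List.map_congr_left (fun k hk => by rw [cntF2 k ((memK1 k).mp hk).2])]
    rw [show ((List.filter (fun k => PySem.Chars.strIsalpha k && !((List.flatMap (fun k => List.replicate (max (List.count k G1) (List.count k G2)) k) (List.filter PySem.Chars.strIsalpha (PySem.Set.ofList G1))).contains k)) (PySem.Set.ofList G2)).map (fun k => ((List.count k G2 : ℕ) : ℤ)))
        = ((List.filter (fun k => PySem.Chars.strIsalpha k && !((List.flatMap (fun k => List.replicate (max (List.count k G1) (List.count k G2)) k) (List.filter PySem.Chars.strIsalpha (PySem.Set.ofList G1))).contains k)) (PySem.Set.ofList G2)).map (fun k => ((List.count k (List.filter PySem.Chars.strIsalpha G2) : ℕ) : ℤ))) from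
      List.map_congr_left (fun k hk => by rw [cntF2 k ((memK2 k).mp hk).2.1])]
    rw [← List.sum_append, ← List.map_append]
    apply sum_count_int
    · rw [List.nodup_append]
      refine ⟨ndK1, ndK2, ?_⟩
      intro k hk1 j hj he
      exact ((memK2 j).mp hj).2.2 (he ▸ ((memK1 k).mp hk1).1)
    · intro k hk
      have hg2 : k ∈ G2 := (List.mem_filter.mp hk).1
      have ha : PySem.Chars.strIsalpha k = true := (List.mem_filter.mp hk).2
      by_cases hg1 : k ∈ G1
      · exact List.mem_append.mpr (Or.inl ((memK1 k).mpr ⟨hg1, ha⟩))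
      · exact List.mem_append.mpr (Or.inr ((memK2 k).mpr ⟨hg2, ha, hg1⟩))
  -- on K2 the max is just the count in G2
  have e3 : ((List.filter (fun k => PySem.Chars.strIsalpha k && !((List.flatMap (fun k => List.replicate (max (List.count k G1) (List.count k G2)) k) (List.filter PySem.Chars.strIsalpha (PySem.Set.ofList G1))).contains k)) (PySem.Set.ofList G2)).map (fun k => ((max (List.count k G1) (List.count k G2) : ℕ) : ℤ))).sum
      = ((List.filter (fun k => PySem.Chars.strIsalpha k && !((List.flatMap (fun k => List.replicate (max (List.count k G1) (List.count k G2)) k) (List.filter PySem.Chars.strIsalpha (PySem.Set.ofList G1))).contains k)) (PySem.Set.ofList G2)).map (fun k => ((List.count k G2 : ℕ) : ℤ))).sum := by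
    apply congrArg
    apply List.map_congr_left
    intro k hk
    have : List.count k G1 = 0 := by
      rw [List.count_eq_zero]
      exact ((memK2 k).mp hk).2.2
    rw [this]
    simp
  -- min + max = sum of counts, summed over K1
  have e4 : ((List.filter PySem.Chars.strIsalpha (PySem.Set.ofList G1)).map (fun k => ((min (List.count k G1) (List.count k G2) : ℕ) : ℤ))).sum
      + ((List.filter PySem.Chars.strIsalpha (PySem.Set.ofList G1)).map (fun k => ((max (List.count k G1) (List.count k G2) : ℕ) : ℤ))).sum
      = ((List.filter PySem.Chars.strIsalpha (PySem.Set.ofList G1)).map (fun k => ((List.count k G1 : ℕ) : ℤ))).sum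
      + ((List.filter PySem.Chars.strIsalpha (PySem.Set.ofList G1)).map (fun k => ((List.count k G2 : ℕ) : ℤ))).sum := by
    rw [← PySem.List.sum_map_add_int, ← PySem.List.sum_map_add_int]
    apply congrArg
    apply List.map_congr_left
    intro k hk
    push_cast
    rw [min_add_max]
  -- the two Int bridge facts
  have hA : ((List.flatMap (fun k => List.replicate (min (List.count k G1) (List.count k G2)) k) (List.filter PySem.Chars.strIsalpha (PySem.Set.ofList G1))).length : ℤ) = ((List.map (fun k => ((min (List.count k (List.filter PySem.Chars.strIsalpha G1)) (List.count k (List.filter PySem.Chars.strIsalpha G2)) : ℕ) : ℤ)) (PySem.Set.ofList (List.filter PySem.Chars.strIsalpha G1))).sum) := by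
    rw [lA, i1, Nat.cast_list_sum, List.map_map]
    simp [Function.comp_def]
  have hB : (((List.flatMap (fun k => List.replicate (max (List.count k G1) (List.count k G2)) k) (List.filter PySem.Chars.strIsalpha (PySem.Set.ofList G1))) ++ List.flatMap (fun k => List.replicate (max (List.count k G1) (List.count k G2)) k) (List.filter (fun k => PySem.Chars.strIsalpha k && !((List.flatMap (fun k => List.replicate (max (List.count k G1) (List.count k G2)) k) (List.filter PySem.Chars.strIsalpha (PySem.Set.ofList G1))).contains k)) (PySem.Set.ofList G2))).length : ℤ) = (((List.map (fun k => ((List.count k (List.filter PySem.Chars.strIsalpha G1) : ℕ) : ℤ)) (PySem.Set.ofList (List.filter PySem.Chars.strIsalpha G1))).sum) + ((List.map (fun k => ((List.count k (List.filter PySem.Chars.strIsalpha G2) : ℕ) : ℤ)) (PySem.Set.ofList (List.filter PySem.Chars.strIsalpha G2))).sum) - ((List.map (fun k => ((min (List.count k (List.filter PySem.Chars.strIsalpha G1)) (List.count k (List.filter PySem.Chars.strIsalpha G2)) : ℕ) : ℤ)) (PySem.Set.ofList (List.filter PySem.Chars.strIsalpha G1))).sum)) := by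
    rw [List.length_append, lB1, lB2, Nat.cast_add, Nat.cast_list_sum, Nat.cast_list_sum,
      List.map_map, List.map_map]
    simp only [Function.comp_def]
    rw [e3, i1]
    linarith [e1, e2, e4, t1, t2]
  -- A is never longer than B
  have hAB : (List.flatMap (fun k => List.replicate (min (List.count k G1) (List.count k G2)) k) (List.filter PySem.Chars.strIsalpha (PySem.Set.ofList G1))).length ≤ ((List.flatMap (fun k => List.replicate (max (List.count k G1) (List.count k G2)) k) (List.filter PySem.Chars.strIsalpha (PySem.Set.ofList G1))) ++ List.flatMap (fun k => List.replicate (max (List.count k G1) (List.count k G2)) k) (List.filter (fun k => PySem.Chars.strIsalpha k && !((List.flatMap (fun k => List.replicate (max (List.count k G1) (List.count k G2)) k) (List.filter PySem.Chars.strIsalpha (PySem.Set.ofList G1))).contains k)) (PySem.Set.ofList G2))).length := by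
    rw [lA, List.length_append, lB1]
    have : ((List.filter PySem.Chars.strIsalpha (PySem.Set.ofList G1)).map (fun k => min (List.count k G1) (List.count k G2))).sum
        ≤ ((List.filter PySem.Chars.strIsalpha (PySem.Set.ofList G1)).map (fun k => max (List.count k G1) (List.count k G2))).sum :=
      List.sum_le_sum (fun k _ => (min_le_left _ _).trans (le_max_left _ _))
    omega
  -- assemble
  have hcond : (((List.flatMap (fun k => List.replicate (max (List.count k G1) (List.count k G2)) k) (List.filter PySem.Chars.strIsalpha (PySem.Set.ofList G1))) ++ List.flatMap (fun k => List.replicate (max (List.count k G1) (List.count k G2)) k) (List.filter (fun k => PySem.Chars.strIsalpha k && !((List.flatMap (fun k => List.replicate (max (List.count k G1) (List.count k G2)) k) (List.filter PySem.Chars.strIsalpha (PySem.Set.ofList G1))).contains k)) (PySem.Set.ofList G2))) = [] ∧ (List.flatMap (fun k => List.replicate (min (List.count k G1) (List.count k G2)) k) (List.filter PySem.Chars.strIsalpha (PySem.Set.ofList G1))) = []) ↔ (((List.map (fun k => ((List.count k (List.filter PySem.Chars.strIsalpha G1) : ℕ) : ℤ)) (PySem.Set.ofList (List.filter PySem.Chars.strIsalpha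 G1))).sum) + ((List.map (fun k => ((List.count k (List.filter PySem.Chars.strIsalpha G2) : ℕ) : ℤ)) (PySem.Set.ofList (List.filter PySem.Chars.strIsalpha G2))).sum) - ((List.map (fun k => ((min (List.count k (List.filter PySem.Chars.strIsalpha G1)) (List.count k (List.filter PySem.Chars.strIsalpha G2)) : ℕ) : ℤ)) (PySem.Set.ofList (List.filter PySem.Chars.strIsalpha G1))).sum)) = 0 := by
    constructor
    · rintro ⟨hb, -⟩
      rw [← hB, hb]
      simp
    · intro hu
      have hbl : ((List.flatMap (fun k => List.replicate (max (List.count k G1) (List.count k G2)) k) (List.filter PySem.Chars.strIsalpha (PySem.Set.ofList G1))) ++ List.flatMap (fun k => List.replicate (max (List.count k G1) (List.count k G2)) k) (List.filter (fun k => PySem.Chars.strIsalpha k && !((List.flatMap (fun k => List.replicate (max (List.count k G1) (List.count k G2)) k) (List.filter PySem.Chars.strIsalpha (PySem.Set.ofList G1))).contains k)) (PySem.Set.ofList G2))).length = 0 := by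
        have := hB.trans hu
        exact_mod_cast this
      have hal : (List.flatMap (fun k => List.replicate (min (List.count k G1) (List.count k G2)) k) (List.filter PySem.Chars.strIsalpha (PySem.Set.ofList G1))).length = 0 := Nat.le_zero.mp (hbl ▸ hAB)
      exact ⟨List.eq_nil_of_length_eq_zero hbl, List.eq_nil_of_length_eq_zero hal⟩
  by_cases h : (((List.map (fun k => ((List.count k (List.filter PySem.Chars.strIsalpha G1) : ℕ) : ℤ)) (PySem.Set.ofList (List.filter PySem.Chars.strIsalpha G1))).sum) + ((List.map (fun k => ((List.count k (List.filter PySem.Chars.strIsalpha G2) : ℕ) : ℤ)) (PySem.Set.ofList (List.filter PySem.Chars.strIsalpha G2))).sum) - ((List.map (fun k => ((min (List.count k (List.filter PySem.Chars.strIsalpha G1)) (List.count k (List.filter PySem.Chars.strIsalpha G2)) : ℕ) : ℤ)) (PySem.Set.ofList (List.filter PySem.Chars.strIsalpha G1))).sum)) = 0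
  · rw [if_pos h, if_pos (hcond.mpr h)]
  · rw [if_neg h, if_neg (fun hc => h (hcond.mp hc)), hA, hB]

-- ===== VERDICT (by name: the statement is the Claim_ definition above) =====

theorem solution_spec : Claim_equal_solution := by
  intro str1 str2 _
  unfold Spec_solution
  simp only [solution, solution_alt, solAList_eq, altGrams_eq]
  rw [PySem.Dict.keys_counter, PySem.Dict.keys_counter]
  rw [loop1_eq PySem.Chars.strIsalpha
        (fun k => min ((PySem.Dict.counter (bgL str1.toList)).getD k 0) ((PySem.Dict.counter (bgL str2.toList)).getD k 0))
        (fun k => max ((PySem.Dict.counter (bgL str1.toList)).getD k 0) ((PySem.Dict.counter (bgL str2.toList)).getD k 0))]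
  rw [loop2_eq PySem.Chars.strIsalpha
        (fun k => max ((PySem.Dict.counter (bgL str1.toList)).getD k 0) ((PySem.Dict.counter (bgL str2.toList)).getD k 0))
        (PySem.Set.ofList (bgL str2.toList)) (PySem.Set.nodup_ofList _)]
  rw [PySem.Dict.values_eq_map_keys _ (PySem.Dict.nodup_keys_counter _) 0,
      PySem.Dict.values_eq_map_keys _ (PySem.Dict.nodup_keys_counter _) 0,
      PySem.Dict.keys_counter, PySem.Dict.keys_counter, PySem.Dict.items_counter,
      PySem.List.foldl_add
        (g := fun p : List Char × Int => min p.2 ((PySem.Dict.counter (fgL str2.toList)).getD p.1 0)),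
      List.map_map]
  simp only [PySem.Dict.getD_counter, Function.comp_def, zero_add, ← Nat.cast_min, ← Nat.cast_max,
    Int.toNat_natCast, fgL]
  exact core (bgL str1.toList) (bgL str2.toList)
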